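-- pv_equiv track=rewrite | github.com/KhrystynaUrsuliak/devops-portfolio | go-tools/sorted/Code/lab-3/main.py | belongs_to_regex
-- ===== SOURCE A (Python) =====
-- def belongs_to_regex(word):
--     state = 'S'
--     i = 0
--
--     while i < len(word):
--         char = word[i]
--
--         if state == 'S':
--             if char == 'x':
--                 state = 'A'
--                 i += 1
--             elif char == 'y':
--                 state = 'B'
--                 i += 1
--             else:
--                 return False
--
--         elif state == 'A':
--             if char == 'y':
--                 state = 'C'
--                 i += 1
--             else:
--                 return False
--
--         elif state == 'B':
--             if char == 'x':
--                 state = 'S10'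
--                 i += 1
--
--             elif char == 'y':
--                 state = 'S13'
--                 i += 1
--             else:
--                 return False
--
--         elif state == 'C':
--             if char == 'x':
--                 state = 'S10'
--                 i += 1
--             elif char == 'y':
--                 state = 'S'
--                 i += 1
--             else:
--                 return False
--
--         elif state == 'S10':
--             if char == 'y':
--                 state = 'S11'
--                 i += 1
--             else:
--                 return False
--
--         elif state == 'S11':
--             if char == 'y':
--                 state = 'B'
--                 i += 1
--             else:
--                 return False
--
--         elif state == 'S13':
--             if char == 'y':
--                 state = 'S13'
--                 i += 1
--             else:
--                 return False
--
--         else: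
--             return False
--
--     return state in ['S', 'A', 'B', 'C', 'S11', 'S13']
-- ===== SOURCE B (Python) =====
-- def _runs(word):
--     # lengths of the maximal 'y'-runs separated by 'x's; None if any other char occurs
--     acc = []
--     cur = 0
--     for c in word:
--         if c == 'y':
--             cur += 1
--         elif c == 'x':
--             acc.append(cur)
--             cur = 0
--         else:
--             return None
--     acc.append(cur)
--     return acc
--
--
-- def belongs_to_regex(word):
--     runs = _runs(word)
--     if runs is None:
--         return False
--     if len(runs) == 1:
--         return True
--     first, mid, last = runs[0], runs[1:-1], runs[-1]
--     nontwo = [m for m in mid if m != 2]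
--     if first == 1:
--         return nontwo == [] and last >= 1
--     if first != 0:
--         return False
--     return nontwo == [] or (len(nontwo) == 1 and nontwo[0] in (1, 3) and last >= 1)
-- ===== Notes on version B (the rewrite author's own statement) =====
-- stated objective: alternative
-- what changed: Replaces the 7-state per-character DFA simulation with run-length encoding: B computes the lengths of the y-runs between the x's and accepts via a closed-form condition on that run list (first run 0 or 1, at most one inner run differing from 2 and then it must be 1 or 3, last run nonzero when required).
import Mathlib
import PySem

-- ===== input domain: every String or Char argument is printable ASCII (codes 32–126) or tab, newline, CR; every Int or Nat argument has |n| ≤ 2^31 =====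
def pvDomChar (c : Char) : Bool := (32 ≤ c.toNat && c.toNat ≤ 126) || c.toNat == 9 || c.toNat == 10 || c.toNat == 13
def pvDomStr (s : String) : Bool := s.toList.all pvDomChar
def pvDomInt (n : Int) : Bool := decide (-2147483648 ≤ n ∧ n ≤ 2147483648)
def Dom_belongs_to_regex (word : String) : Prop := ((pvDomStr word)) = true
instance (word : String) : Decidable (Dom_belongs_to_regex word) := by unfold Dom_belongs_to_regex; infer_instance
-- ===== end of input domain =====

-- B replaces A's per-character 7-state DFA simulation with run-length encoding:
-- it computes the lengths of the y-runs between the x's and tests a closed-form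
-- condition on that run list; objective: alternative algorithm, same O(n) cost.

-- ===== PORT A =====
-- A's while loop over word[i], transliterated as structural recursion on the
-- remaining characters with the state string as accumulator; branch order preserved.
def belongsA : String → List Char → Bool
  | state, [] => [("S" : String), "A", "B", "C", "S11", "S13"].contains state
  | state, char :: rest =>
    if state = "S" then
      if char = 'x' then belongsA "A" rest
      else if char = 'y' then belongsA "B" rest
      else false
    else if state = "A" then
      if char = 'y' then belongsA "C" rest
      else false
    else if state = "B" then
      if char = 'x' then belongsA "S10" rest
      else if char = 'y' then belongsA "S13" rest
      else false
    else if state = "C" then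
      if char = 'x' then belongsA "S10" rest
      else if char = 'y' then belongsA "S" rest
      else false
    else if state = "S10" then
      if char = 'y' then belongsA "S11" rest
      else false
    else if state = "S11" then
      if char = 'y' then belongsA "B" rest
      else false
    else if state = "S13" then
      if char = 'y' then belongsA "S13" rest
      else false
    else false

def belongs_to_regex (word : String) : Bool := belongsA "S" word.toList

-- ===== PORT B =====
-- Source B's _runs: lengths of the maximal 'y'-runs separated by 'x's, none if any
-- other character occurs; for-loop with accumulator list acc and counter cur,
-- exactly as in Source B (acc.append = acc ++ [·]).
def pvRunsLoop : List Char → List Nat → Nat → Option (List Nat)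
  | [], acc, cur => some (acc ++ [cur])
  | c :: rest, acc, cur =>
    if c = 'y' then pvRunsLoop rest acc (cur + 1)
    else if c = 'x' then pvRunsLoop rest (acc ++ [cur]) 0
    else none

-- Source B's belongs_to_regex: run-length list, then the closed-form condition
-- (first = runs[0], mid = runs[1:-1], last = runs[-1], nontwo = [m for m in mid if m != 2]).
-- _runs never returns an empty list; the [] branch is the unreachable default.
def belongs_to_regex_alt (word : String) : Bool :=
  match pvRunsLoop word.toList [] 0 with
  | none => false
  | some [] => false
  | some [_] => true
  | some (first :: m :: tl) =>
    let rest := m :: tl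
    let mid := rest.dropLast
    let last := rest.getLast!
    let nontwo := mid.filter (fun g => g ≠ 2)
    if first = 1 then nontwo = [] ∧ 1 ≤ last
    else if first ≠ 0 then false
    else nontwo = [] ∨ (nontwo.length = 1 ∧ (nontwo.headD 0 = 1 ∨ nontwo.headD 0 = 3) ∧ 1 ≤ last)

-- ===== PRECONDITION & SPEC =====
def Spec_belongs_to_regex (word : String) (out : Bool) : Prop := out = belongs_to_regex_alt word
instance (word : String) (out : Bool) : Decidable (Spec_belongs_to_regex word out) := by unfold Spec_belongs_to_regex; infer_instance

-- ===== CLAIM =====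
def Claim_equal_belongs_to_regex : Prop := ∀ (word : String), Dom_belongs_to_regex word → Spec_belongs_to_regex word (belongs_to_regex word)

-- ===== LEMMAS AND PROOFS =====

-- Proof-side head-recursive formulation of the run-length scan.
def pvRuns : List Char → Option (List Nat)
  | [] => some [0]
  | c :: rest =>
    match pvRuns rest with
    | none => none
    | some r =>
      if c = 'y' then
        some (match r with | m :: tl => (m + 1) :: tl | [] => [])
      else if c = 'x' then some (0 :: r)
      else none

-- Reference acceptance conditions on the run list, from the two after-'x' states.
def ref10 : List Nat → Bool
  | [] => false
  | [last] => decide (1 ≤ last)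
  | m :: rest => if m = 2 then ref10 rest else false

def refA : List Nat → Bool
  | [] => true
  | [_] => true
  | m :: rest => if m = 2 then refA rest else if m = 1 ∨ m = 3 then ref10 rest else false

-- The word a run list denotes.
def joinRuns : List Nat → List Char
  | [] => []
  | [m] => List.replicate m 'y'
  | m :: rest => List.replicate m 'y' ++ 'x' :: joinRuns rest

theorem s13_run (m : Nat) (rest : List Char) :
    belongsA "S13" (List.replicate m 'y' ++ rest) = belongsA "S13" rest := by
  induction m with
  | zero => simp
  | succ n ih => simpa [List.replicate_succ, belongsA] using ih

theorem a_run_x (m : Nat) (rest : List Char) :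
    belongsA "A" (List.replicate m 'y' ++ 'x' :: rest) =
      if m = 2 then belongsA "A" rest
      else if m = 1 ∨ m = 3 then belongsA "S10" rest else false := by
  match m with
  | 0 => simp [belongsA]
  | 1 => simp [belongsA, List.replicate_succ]
  | 2 => simp [belongsA, List.replicate_succ]
  | 3 => simp [belongsA, List.replicate_succ]
  | n + 4 =>
    have h := s13_run n ('x' :: rest)
    simp [belongsA, List.replicate_succ, h]

theorem a_run_end (m : Nat) :
    belongsA "A" (List.replicate m 'y') = true := by
  match m with
  | 0 => simp [belongsA]
  | 1 => simp [belongsA, List.replicate_succ]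
  | 2 => simp [belongsA, List.replicate_succ]
  | 3 => simp [belongsA, List.replicate_succ]
  | n + 4 =>
    have h := s13_run n ([] : List Char)
    simp [belongsA, List.replicate_succ] at h ⊢
    simpa [belongsA] using h

theorem s10_run_x (m : Nat) (rest : List Char) :
    belongsA "S10" (List.replicate m 'y' ++ 'x' :: rest) =
      if m = 2 then belongsA "S10" rest else false := by
  match m with
  | 0 => simp [belongsA]
  | 1 => simp [belongsA, List.replicate_succ]
  | 2 => simp [belongsA, List.replicate_succ]
  | n + 3 =>
    have h := s13_run n ('x' :: rest)
    simp [belongsA, List.replicate_succ, h]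

theorem s10_run_end (m : Nat) :
    belongsA "S10" (List.replicate m 'y') = decide (1 ≤ m) := by
  match m with
  | 0 => simp [belongsA]
  | 1 => simp [belongsA, List.replicate_succ]
  | 2 => simp [belongsA, List.replicate_succ]
  | n + 3 =>
    have h := s13_run n ([] : List Char)
    simp [belongsA, List.replicate_succ] at h ⊢
    simpa [belongsA] using h

theorem s_run_x (m : Nat) (rest : List Char) :
    belongsA "S" (List.replicate m 'y' ++ 'x' :: rest) =
      if m = 0 then belongsA "A" rest
      else if m = 1 then belongsA "S10" rest else false := by
  match m with
  | 0 => simp [belongsA]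
  | 1 => simp [belongsA, List.replicate_succ]
  | n + 2 =>
    have h := s13_run n ('x' :: rest)
    simp [belongsA, List.replicate_succ, h]

theorem s_run_end (m : Nat) :
    belongsA "S" (List.replicate m 'y') = true := by
  match m with
  | 0 => simp [belongsA]
  | 1 => simp [belongsA, List.replicate_succ]
  | n + 2 =>
    have h := s13_run n ([] : List Char)
    simp [belongsA, List.replicate_succ] at h ⊢
    simpa [belongsA] using h

theorem s10_join (runs : List Nat) (m : Nat) :
    belongsA "S10" (joinRuns (m :: runs)) = ref10 (m :: runs) := by
  induction runs generalizing m with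
  | nil => simpa [joinRuns, ref10] using s10_run_end m
  | cons m' tl ih =>
    show belongsA "S10" (List.replicate m 'y' ++ 'x' :: joinRuns (m' :: tl)) = _
    rw [s10_run_x, ih m']
    rfl

theorem a_join (runs : List Nat) (m : Nat) :
    belongsA "A" (joinRuns (m :: runs)) = refA (m :: runs) := by
  induction runs generalizing m with
  | nil => simpa [joinRuns, refA] using a_run_end m
  | cons m' tl ih =>
    show belongsA "A" (List.replicate m 'y' ++ 'x' :: joinRuns (m' :: tl)) = _
    rw [a_run_x, ih m', s10_join tl m']
    rfl

theorem s_join (runs : List Nat) (m : Nat) :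
    belongsA "S" (joinRuns (m :: runs)) =
      match runs with
      | [] => true
      | _ :: _ => if m = 0 then refA runs else if m = 1 then ref10 runs else false := by
  cases runs with
  | nil => simpa [joinRuns] using s_run_end m
  | cons m' tl =>
    show belongsA "S" (List.replicate m 'y' ++ 'x' :: joinRuns (m' :: tl)) = _
    rw [s_run_x, a_join tl m', s10_join tl m']

theorem join_shift (m : Nat) (tl : List Nat) :
    joinRuns ((m + 1) :: tl) = 'y' :: joinRuns (m :: tl) := by
  cases tl <;> simp [joinRuns, List.replicate_succ]

theorem pvRuns_some (l : List Char) (runs : List Nat) (h : pvRuns l = some runs) :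
    l = joinRuns runs ∧ runs ≠ [] := by
  induction l generalizing runs with
  | nil =>
    simp [pvRuns] at h
    subst h
    exact ⟨rfl, by simp⟩
  | cons c rest ih =>
    rw [pvRuns] at h
    cases hr : pvRuns rest with
    | none => rw [hr] at h; exact absurd h (by simp)
    | some r =>
      rw [hr] at h
      obtain ⟨hrest, hne⟩ := ih r hr
      by_cases hy : c = 'y'
      · subst hy
        cases r with
        | nil => exact absurd rfl hne
        | cons m tl =>
          simp at h
          subst h
          refine ⟨?_, by simp⟩
          rw [join_shift, ← hrest]
      · by_cases hx : c = 'x'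
        · subst hx
          simp [hy] at h
          subst h
          cases r with
          | nil => exact absurd rfl hne
          | cons m tl =>
            refine ⟨?_, by simp⟩
            show 'x' :: rest = joinRuns (0 :: m :: tl)
            simp [joinRuns, hrest]
        · simp [hy, hx] at h
    
theorem pvRuns_none (l : List Char) (h : pvRuns l = none) (s : String) :
    belongsA s l = false := by
  induction l generalizing s with
  | nil => simp [pvRuns] at h
  | cons c rest ih =>
    rw [pvRuns] at h
    cases hr : pvRuns rest with
    | none =>
      have := ih hr
      rw [belongsA]
      split_ifs <;> simp [this]
    | some r =>
      rw [hr] at h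
      have hy : c ≠ 'y' := by intro hc; subst hc; simp at h
      have hx : c ≠ 'x' := by intro hc; subst hc; simp [hy] at h
      rw [belongsA]
      split_ifs <;> simp_all

theorem pvRuns_ne_nil (l : List Char) (r : List Nat) (h : pvRuns l = some r) : r ≠ [] :=
  (pvRuns_some l r h).2

theorem runsLoop_eq (l : List Char) (acc : List Nat) (cur : Nat) :
    pvRunsLoop l acc cur =
      match pvRuns l with
      | none => none
      | some [] => none
      | some (m :: tl) => some (acc ++ (cur + m) :: tl) := by
  induction l generalizing acc cur with
  | nil => simp [pvRunsLoop, pvRuns]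
  | cons c rest ih =>
    rw [pvRunsLoop, pvRuns]
    cases hr : pvRuns rest with
    | none => simp [ih, hr]
    | some r =>
      cases r with
      | nil => exact absurd hr fun h => pvRuns_ne_nil rest [] h rfl
      | cons m tl =>
        by_cases hy : c = 'y'
        · subst hy
          simp only [ih, hr]
          have : cur + 1 + m = cur + (m + 1) := by omega
          simp [this]
        · by_cases hx : c = 'x'
          · subst hx
            simp [hy, ih, hr]
          · simp [hy, hx]

theorem ref10_char (rest : List Nat) (h : rest ≠ []) :
    ref10 rest =
      decide (rest.dropLast.filter (fun g => g ≠ 2) = [] ∧ 1 ≤ rest.getLast!) := by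
  induction rest with
  | nil => exact absurd rfl h
  | cons m tl ih =>
    cases tl with
    | nil => simp [ref10, List.getLast!]
    | cons m' tl' =>
      have ihs := ih (by simp)
      have hdl : (m :: m' :: tl').dropLast = m :: (m' :: tl').dropLast := rfl
      have hgl : (m :: m' :: tl').getLast! = (m' :: tl').getLast! := by
        simp [List.getLast!, List.getLast]
      rw [hdl, hgl]
      by_cases h2 : m = 2
      · subst h2
        rw [show ref10 (2 :: m' :: tl') = ref10 (m' :: tl') from rfl, ihs]
        simp
      · rw [show ref10 (m :: m' :: tl') = if m = 2 then ref10 (m' :: tl') else false from rfl]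
        simp [h2]

theorem refA_char (rest : List Nat) (h : rest ≠ []) :
    refA rest =
      decide (rest.dropLast.filter (fun g => g ≠ 2) = [] ∨
        ((rest.dropLast.filter (fun g => g ≠ 2)).length = 1 ∧
         ((rest.dropLast.filter (fun g => g ≠ 2)).headD 0 = 1 ∨
          (rest.dropLast.filter (fun g => g ≠ 2)).headD 0 = 3) ∧
         1 ≤ rest.getLast!)) := by
  induction rest with
  | nil => exact absurd rfl h
  | cons m tl ih =>
    cases tl with
    | nil => simp [refA]
    | cons m' tl' =>
      have ihs := ih (by simp)
      have hdl : (m :: m' :: tl').dropLast = m :: (m' :: tl').dropLast := rfl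
      have hgl : (m :: m' :: tl').getLast! = (m' :: tl').getLast! := by
        simp [List.getLast!, List.getLast]
      rw [hdl, hgl]
      have hstep : refA (m :: m' :: tl') =
          if m = 2 then refA (m' :: tl') else if m = 1 ∨ m = 3 then ref10 (m' :: tl') else false := rfl
      by_cases h2 : m = 2
      · subst h2
        rw [hstep, if_pos rfl, ihs]
        simp
      · rw [hstep, if_neg h2]
        by_cases h13 : m = 1 ∨ m = 3
        · rw [if_pos h13, ref10_char (m' :: tl') (by simp)]
          simp [h2, h13, List.length_eq_zero_iff]
        · rw [if_neg h13]
          obtain ⟨hm1, hm3⟩ := not_or.mp h13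
          simp [h2, hm1, hm3]

-- ===== VERDICT =====
theorem belongs_to_regex_spec : Claim_equal_belongs_to_regex := by
  intro word _
  unfold Spec_belongs_to_regex belongs_to_regex belongs_to_regex_alt
  rw [runsLoop_eq]
  simp only [List.nil_append, Nat.zero_add]
  cases h : pvRuns word.toList with
  | none => exact pvRuns_none _ h "S"
  | some runs =>
    obtain ⟨hjoin, hne⟩ := pvRuns_some _ _ h
    rw [hjoin]
    cases runs with
    | nil => exact absurd rfl hne
    | cons first rest =>
      rw [s_join]
      cases rest with
      | nil => rfl
      | cons m tl =>
        simp only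
        by_cases h1 : first = 1
        · subst h1
          rw [if_neg (by omega), if_pos rfl, ref10_char (m :: tl) (by simp)]
          simp
        · by_cases h0 : first = 0
          · subst h0
            rw [if_pos rfl, if_neg h1, if_neg (by simp), refA_char (m :: tl) (by simp)]
          · simp [h0, h1]
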